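-- pv_equiv track=rewrite | github.com/public-arch/Marithmetics | DEMO-GRRA-MASTER_v3.py | ordered_triple_count
-- ===== SOURCE A (Python) =====
-- from typing import Dict, List, Optional, Tuple
--
-- def ordered_triple_count(U1: List[int], SU2: List[int], SU3: List[int]) -> Tuple[int, Optional[Tuple[int,int,int]]]:
--     triples = []
--     for wU in U1:
--         for s2 in SU2:
--             if wU <= s2:
--                 continue
--             for s3 in SU3:
--                 if s2 <= s3:
--                     continue
--                 triples.append((wU, s2, s3))
--     triples = sorted(set(triples))
--     if len(triples) == 1:
--         return (1, triples[0])
--     return (len(triples), None)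
-- ===== SOURCE B (Python) =====
-- from typing import Dict, List, Optional, Tuple
--
-- def ordered_triple_count(U1: List[int], SU2: List[int], SU3: List[int]) -> Tuple[int, Optional[Tuple[int,int,int]]]:
--     # Count distinct triples (a, b, c) with a>b>c by pure counting: dedup each
--     # list, then for each distinct middle value b the number of triples is
--     # (#distinct a > b) * (#distinct c < b); no triple list is materialized.
--     da = list(dict.fromkeys(U1))
--     db = list(dict.fromkeys(SU2))
--     dc = list(dict.fromkeys(SU3))
--     total = 0
--     best = None
--     for b in db:
--         fa = [a for a in da if a > b]
--         fc = [c for c in dc if c < b]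
--         cnt = len(fa) * len(fc)
--         if cnt == 1:
--             best = (fa[0], b, fc[0])
--         total += cnt
--     if total == 1:
--         return (1, best)
--     return (total, None)
-- ===== Notes on version B (the rewrite author's own statement) =====
-- stated objective: faster
-- what changed: Instead of materializing every qualifying triple from the three nested loops and then deduplicating and sorting that cubic-size list, B deduplicates the three input lists once and, for each distinct middle value b, counts (#distinct a>b)*(#distinct c<b), only reconstructing the triple when a middle value contributes exactly one.
import Mathlib
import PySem

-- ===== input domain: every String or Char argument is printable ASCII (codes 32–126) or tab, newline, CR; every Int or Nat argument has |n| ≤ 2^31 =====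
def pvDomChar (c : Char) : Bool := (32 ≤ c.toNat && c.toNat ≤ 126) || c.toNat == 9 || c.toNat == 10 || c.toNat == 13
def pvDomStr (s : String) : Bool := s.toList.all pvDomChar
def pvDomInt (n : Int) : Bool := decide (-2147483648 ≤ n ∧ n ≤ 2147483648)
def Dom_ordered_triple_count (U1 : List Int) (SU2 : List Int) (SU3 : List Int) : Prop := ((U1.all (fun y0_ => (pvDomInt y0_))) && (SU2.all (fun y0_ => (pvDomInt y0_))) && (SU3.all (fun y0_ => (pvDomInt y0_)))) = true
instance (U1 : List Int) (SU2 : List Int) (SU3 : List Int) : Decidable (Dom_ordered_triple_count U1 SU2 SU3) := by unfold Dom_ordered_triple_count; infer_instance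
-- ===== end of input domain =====

-- B replaces A's materialize-every-triple O(|U1|·|SU2|·|SU3|) enumeration (plus dedup+sort of
-- that cubic list) by pure counting over the deduplicated lists: for each distinct middle value
-- b it adds (#distinct a>b)·(#distinct c<b); equivalence of the return values is proved below.

-- ===== PORT A =====
-- the three nested loops of A, appending (wU, s2, s3) when wU > s2 > s3 ('continue' = skip)
def otcTriplesRaw (U1 : List Int) (SU2 : List Int) (SU3 : List Int) : List (Int × Int × Int) :=
  U1.foldl (fun acc wU =>
    SU2.foldl (fun acc2 s2 =>
      if wU ≤ s2 then acc2
      else SU3.foldl (fun acc3 s3 =>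
        if s2 ≤ s3 then acc3 else acc3 ++ [(wU, s2, s3)]) acc2) acc) []

def ordered_triple_count (U1 : List Int) (SU2 : List Int) (SU3 : List Int) : Int × (Option (Int × Int × Int)) :=
  -- sorted(set(triples)); Python sorts tuples lexicographically = the Lex key below
  let triples := PySem.List.sorted (PySem.Set.ofList (otcTriplesRaw U1 SU2 SU3))
      (fun t => toLex (t.1, toLex t.2)) false
  if triples.length = 1 then ((1 : Int), PySem.List.pyGet? triples 0)
  else ((triples.length : Int), none)

-- ===== PORT B =====
-- one iteration of B's loop over the distinct middle values b
def otcStep (da : List Int) (dc : List Int) (st : Int × Option (Int × Int × Int)) (b : Int) :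
    Int × Option (Int × Int × Int) :=
  let fa := da.filter (fun a => b < a)
  let fc := dc.filter (fun c => c < b)
  let cnt : Int := (fa.length : Int) * (fc.length : Int)
  -- fa[0] / fc[0]: guarded by cnt = 1, so both lists are nonempty there (headD's default unreachable)
  let best := if cnt = 1 then some (fa.headD 0, b, fc.headD 0) else st.2
  (st.1 + cnt, best)

def ordered_triple_count_alt (U1 : List Int) (SU2 : List Int) (SU3 : List Int) : Int × (Option (Int × Int × Int)) :=
  let r := (PySem.List.dedup SU2).foldl (otcStep (PySem.List.dedup U1) (PySem.List.dedup SU3))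
      ((0 : Int), (none : Option (Int × Int × Int)))
  if r.1 = 1 then ((1 : Int), r.2) else (r.1, none)

-- ===== PRECONDITION & SPEC =====
def Spec_ordered_triple_count (U1 : List Int) (SU2 : List Int) (SU3 : List Int) (out : Int × (Option (Int × Int × Int))) : Prop := out = ordered_triple_count_alt U1 SU2 SU3
instance (U1 : List Int) (SU2 : List Int) (SU3 : List Int) (out : Int × (Option (Int × Int × Int))) : Decidable (Spec_ordered_triple_count U1 SU2 SU3 out) := by unfold Spec_ordered_triple_count; infer_instance

-- ===== CLAIM (what is proved, stated in full; the proofs are below) =====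
def Claim_equal_ordered_triple_count : Prop := ∀ (U1 : List Int) (SU2 : List Int) (SU3 : List Int), Dom_ordered_triple_count U1 SU2 SU3 → Spec_ordered_triple_count U1 SU2 SU3 (ordered_triple_count U1 SU2 SU3)

-- ===== LEMMAS AND PROOFS =====

-- the distinct triples with middle value b, grouped as B counts them
def otcBlock (da : List Int) (dc : List Int) (b : Int) : List (Int × Int × Int) :=
  (da.filter (fun a => b < a)).flatMap (fun a => (dc.filter (fun c => c < b)).map (fun c => (a, b, c)))

-- the canonical duplicate-free list of all qualifying triples, grouped by middle value
def otcL (da : List Int) (db : List Int) (dc : List Int) : List (Int × Int × Int) :=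
  db.flatMap (otcBlock da dc)

lemma otcTriplesRaw_eq (U1 SU2 SU3 : List Int) :
    otcTriplesRaw U1 SU2 SU3 =
      U1.flatMap (fun a => (SU2.filter (fun b => b < a)).flatMap
        (fun b => (SU3.filter (fun c => c < b)).map (fun c => (a, b, c)))) := by
  unfold otcTriplesRaw
  have hin : ∀ (wU s2 : Int) (acc : List (Int × Int × Int)),
      SU3.foldl (fun acc3 s3 => if s2 ≤ s3 then acc3 else acc3 ++ [(wU, s2, s3)]) acc
        = acc ++ (SU3.filter (fun c => c < s2)).map (fun c => (wU, s2, c)) := by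
    intro wU s2 acc
    have h1 : SU3.foldl (fun acc3 s3 => if s2 ≤ s3 then acc3 else acc3 ++ [(wU, s2, s3)]) acc
        = SU3.foldl (fun acc3 s3 => if s3 < s2 then acc3 ++ [(wU, s2, s3)] else acc3) acc := by
      apply PySem.List.foldl_congr_mem
      intro a x _
      by_cases h : s2 ≤ x
      · simp [h, not_lt.mpr h]
      · simp [h, lt_of_not_ge h]
    rw [h1, PySem.List.foldl_append_ite (p := fun s3 => s3 < s2) (f := fun s3 => (wU, s2, s3))]
  have hmid : ∀ (wU : Int) (acc : List (Int × Int × Int)),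
      SU2.foldl (fun acc2 s2 => if wU ≤ s2 then acc2
        else SU3.foldl (fun acc3 s3 => if s2 ≤ s3 then acc3 else acc3 ++ [(wU, s2, s3)]) acc2) acc
      = acc ++ (SU2.filter (fun b => b < wU)).flatMap
          (fun b => (SU3.filter (fun c => c < b)).map (fun c => (wU, b, c))) := by
    intro wU acc
    have h1 : SU2.foldl (fun acc2 s2 => if wU ≤ s2 then acc2
        else SU3.foldl (fun acc3 s3 => if s2 ≤ s3 then acc3 else acc3 ++ [(wU, s2, s3)]) acc2) acc
      = SU2.foldl (fun acc2 s2 => if s2 < wU then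
          acc2 ++ (SU3.filter (fun c => c < s2)).map (fun c => (wU, s2, c)) else acc2) acc := by
      apply PySem.List.foldl_congr_mem
      intro a x _
      by_cases h : wU ≤ x
      · simp [h, not_lt.mpr h]
      · simp [h, lt_of_not_ge h, hin]
    rw [h1, PySem.List.foldl_ite_eq_foldl_filter, PySem.List.foldl_append_eq_flatMap]
  have h2 : U1.foldl (fun acc wU =>
      SU2.foldl (fun acc2 s2 => if wU ≤ s2 then acc2
        else SU3.foldl (fun acc3 s3 => if s2 ≤ s3 then acc3 else acc3 ++ [(wU, s2, s3)]) acc2) acc) []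
    = U1.foldl (fun acc wU => acc ++ (SU2.filter (fun b => b < wU)).flatMap
          (fun b => (SU3.filter (fun c => c < b)).map (fun c => (wU, b, c)))) [] := by
    apply PySem.List.foldl_congr_mem
    intro a x _
    exact hmid x a
  rw [h2, PySem.List.foldl_append_eq_flatMap]
  simp

lemma mem_otcTriplesRaw (U1 SU2 SU3 : List Int) (t : Int × Int × Int) :
    t ∈ otcTriplesRaw U1 SU2 SU3 ↔
      t.1 ∈ U1 ∧ t.2.1 ∈ SU2 ∧ t.2.2 ∈ SU3 ∧ t.2.1 < t.1 ∧ t.2.2 < t.2.1 := by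
  obtain ⟨a, b, c⟩ := t
  rw [otcTriplesRaw_eq]
  simp only [List.mem_flatMap, List.mem_map, List.mem_filter]
  constructor
  · rintro ⟨a', ha', b', ⟨hb', hba'⟩, c', ⟨hc', hcb'⟩, h⟩
    obtain ⟨rfl, rfl, rfl⟩ := Prod.mk.injEq .. ▸ h
    exact ⟨ha', hb', hc', by simpa using hba', by simpa using hcb'⟩
  · rintro ⟨ha, hb, hc, h1, h2⟩
    exact ⟨a, ha, b, ⟨hb, by simpa using h1⟩, c, ⟨hc, by simpa using h2⟩, rfl⟩

lemma mem_otcL (da db dc : List Int) (t : Int × Int × Int) :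
    t ∈ otcL da db dc ↔
      t.1 ∈ da ∧ t.2.1 ∈ db ∧ t.2.2 ∈ dc ∧ t.2.1 < t.1 ∧ t.2.2 < t.2.1 := by
  obtain ⟨a, b, c⟩ := t
  simp only [otcL, otcBlock, List.mem_flatMap, List.mem_map, List.mem_filter]
  constructor
  · rintro ⟨b', hb', a', ⟨ha', hba'⟩, c', ⟨hc', hcb'⟩, h⟩
    obtain ⟨rfl, rfl, rfl⟩ := Prod.mk.injEq .. ▸ h
    exact ⟨ha', hb', hc', by simpa using hba', by simpa using hcb'⟩
  · rintro ⟨ha, hb, hc, h1, h2⟩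
    exact ⟨b, hb, a, ⟨ha, by simpa using h1⟩, c, ⟨hc, by simpa using h2⟩, rfl⟩

lemma nodup_flatMap_tag {α β : Type} (xs : List α) (f : α → List β) (tag : β → α)
    (hx : xs.Nodup) (hf : ∀ x ∈ xs, (f x).Nodup)
    (htag : ∀ x ∈ xs, ∀ y ∈ f x, tag y = x) : (xs.flatMap f).Nodup := by
  induction xs with
  | nil => simp
  | cons x xs ih =>
    simp only [List.flatMap_cons]
    apply List.Nodup.append
    · exact hf x (by simp)
    · exact ih hx.of_cons (fun z hz => hf z (by simp [hz])) (fun z hz => htag z (by simp [hz]))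
    · intro y hy1 hy2
      rw [List.mem_flatMap] at hy2
      obtain ⟨z, hz, hyz⟩ := hy2
      have h1 := htag x (by simp) y hy1
      have h2 := htag z (by simp [hz]) y hyz
      have : x ∉ xs := by
        have := hx
        rw [List.nodup_cons] at this
        exact this.1
      exact (this (h1 ▸ h2 ▸ hz)).elim

lemma nodup_otcL (da db dc : List Int) (ha : da.Nodup) (hb : db.Nodup) (hc : dc.Nodup) :
    (otcL da db dc).Nodup := by
  apply nodup_flatMap_tag db (otcBlock da dc) (fun t => t.2.1) hb
  · intro b _
    apply nodup_flatMap_tag _ _ (fun t => t.1) (ha.filter _)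
    · intro a _
      exact (hc.filter _).map (fun c c' h => by simpa using h)
    · intro a _ y hy
      obtain ⟨c, _, rfl⟩ := List.mem_map.mp hy
      rfl
  · intro b _ y hy
    obtain ⟨a, _, c, _, rfl⟩ := by simpa [otcBlock, List.mem_flatMap, List.mem_map] using hy
    rfl

lemma otcBlock_length (da dc : List Int) (b : Int) :
    (otcBlock da dc b).length =
      (da.filter (fun a => b < a)).length * (dc.filter (fun c => c < b)).length := by
  simp [otcBlock]

lemma perm_set_raw_otcL (U1 SU2 SU3 : List Int) :
    (PySem.Set.ofList (otcTriplesRaw U1 SU2 SU3)).Perm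
      (otcL (PySem.List.dedup U1) (PySem.List.dedup SU2) (PySem.List.dedup SU3)) := by
  apply (List.perm_ext_iff_of_nodup (PySem.Set.nodup_ofList _)
    (nodup_otcL _ _ _ (PySem.List.nodup_dedup _) (PySem.List.nodup_dedup _) (PySem.List.nodup_dedup _))).mpr
  intro t
  rw [PySem.Set.mem_ofList, mem_otcTriplesRaw, mem_otcL]
  simp

lemma otc_total_eq (da db dc : List Int) :
    db.foldl (fun acc b => acc +
        ((da.filter (fun a => b < a)).length : Int) * ((dc.filter (fun c => c < b)).length : Int)) 0
      = ((otcL da db dc).length : Int) := by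
  rw [PySem.List.foldl_add (g := fun b =>
    ((da.filter (fun a => b < a)).length : Int) * ((dc.filter (fun c => c < b)).length : Int))]
  simp only [otcL, List.length_flatMap, zero_add]
  rw [Nat.cast_list_sum, List.map_map]
  congr 1
  apply List.map_congr_left
  intro b _
  simp [otcBlock_length]

lemma otc_best_of_singleton (da dc : List Int) (db : List Int) (t : Int × Int × Int)
    (h : otcL da db dc = [t]) :
    db.foldl (fun o b =>
        if ((da.filter (fun a => b < a)).length : Int) * ((dc.filter (fun c => c < b)).length : Int) = 1
        then some ((da.filter (fun a => b < a)).headD 0, b, (dc.filter (fun c => c < b)).headD 0)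
        else o) none = some t := by
  induction db using List.reverseRecOn with
  | nil => simp [otcL] at h
  | append_singleton db' b ih =>
    rw [List.foldl_append, List.foldl_cons, List.foldl_nil]
    have hsplit : otcL da db' dc ++ otcBlock da dc b = [t] := by
      simpa [otcL, List.flatMap_append] using h
    rcases hL' : otcL da db' dc with _ | ⟨x, xs⟩
    · -- all triples come from the last middle value b
      rw [hL'] at hsplit
      simp only [List.nil_append] at hsplit
      have hlen : (da.filter (fun a => b < a)).length * (dc.filter (fun c => c < b)).length = 1 := by
        rw [← otcBlock_length, hsplit]; rfl
      obtain ⟨hfa, hfc⟩ := mul_eq_one.mp hlen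
      obtain ⟨a0, ha0⟩ := List.length_eq_one_iff.mp hfa
      obtain ⟨c0, hc0⟩ := List.length_eq_one_iff.mp hfc
      have hblock : otcBlock da dc b = [(a0, b, c0)] := by
        simp [otcBlock, ha0, hc0]
      rw [hsplit] at hblock
      have hcond : ((da.filter (fun a => b < a)).length : Int) * ((dc.filter (fun c => c < b)).length : Int) = 1 := by
        rw [ha0, hc0]; rfl
      rw [if_pos hcond, ha0, hc0]
      simpa using hblock.symm
    · -- the singleton triple already came from an earlier middle value; block b is empty
      rw [hL'] at hsplit
      obtain ⟨rfl, hxs, hblock⟩ : x = t ∧ xs = [] ∧ otcBlock da dc b = [] := by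
        simpa using hsplit
      have hlen0 : (da.filter (fun a => b < a)).length * (dc.filter (fun c => c < b)).length = 0 := by
        rw [← otcBlock_length, hblock]; rfl
      have hcond : ¬ (((da.filter (fun a => b < a)).length : Int) * ((dc.filter (fun c => c < b)).length : Int) = 1) := by
        rw [← Nat.cast_mul, hlen0]
        decide
      rw [if_neg hcond]
      exact ih (by rw [hL', hxs])

lemma otcStep_foldl (da dc db : List Int) :
    db.foldl (otcStep da dc) (0, none) =
      (db.foldl (fun acc b => acc +
          ((da.filter (fun a => b < a)).length : Int) * ((dc.filter (fun c => c < b)).length : Int)) 0,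
       db.foldl (fun o b =>
          if ((da.filter (fun a => b < a)).length : Int) * ((dc.filter (fun c => c < b)).length : Int) = 1
          then some ((da.filter (fun a => b < a)).headD 0, b, (dc.filter (fun c => c < b)).headD 0)
          else o) none) := by
  exact PySem.List.foldl_prod_mk
    (f := fun acc b => acc +
      ((da.filter (fun a => b < a)).length : Int) * ((dc.filter (fun c => c < b)).length : Int))
    (g := fun o b =>
      if ((da.filter (fun a => b < a)).length : Int) * ((dc.filter (fun c => c < b)).length : Int) = 1
      then some ((da.filter (fun a => b < a)).headD 0, b, (dc.filter (fun c => c < b)).headD 0)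
      else o) db 0 none

-- ===== VERDICT (by name: the statement is the Claim_ definition above) =====
theorem ordered_triple_count_spec : Claim_equal_ordered_triple_count := by
  intro U1 SU2 SU3 _
  unfold Spec_ordered_triple_count
  simp only [ordered_triple_count, ordered_triple_count_alt]
  rw [otcStep_foldl, otc_total_eq]
  have hperm : (PySem.List.sorted (PySem.Set.ofList (otcTriplesRaw U1 SU2 SU3))
      (fun t => toLex (t.1, toLex t.2)) false).Perm
      (otcL (PySem.List.dedup U1) (PySem.List.dedup SU2) (PySem.List.dedup SU3)) :=
    (PySem.List.sorted_perm _ _ _).trans (perm_set_raw_otcL U1 SU2 SU3)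
  have hlen : (PySem.List.sorted (PySem.Set.ofList (otcTriplesRaw U1 SU2 SU3))
      (fun t => toLex (t.1, toLex t.2)) false).length
      = (otcL (PySem.List.dedup U1) (PySem.List.dedup SU2) (PySem.List.dedup SU3)).length :=
    hperm.length_eq
  by_cases h1 : (otcL (PySem.List.dedup U1) (PySem.List.dedup SU2) (PySem.List.dedup SU3)).length = 1
  · obtain ⟨t, ht⟩ := List.length_eq_one_iff.mp h1
    have hS : PySem.List.sorted (PySem.Set.ofList (otcTriplesRaw U1 SU2 SU3))
        (fun t => toLex (t.1, toLex t.2)) false = [t] :=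
      List.perm_singleton.mp (ht ▸ hperm)
    rw [if_pos (by rw [hlen, h1]), if_pos (by rw [h1]; rfl), hS,
      otc_best_of_singleton _ _ _ _ ht]
    simp [PySem.List.pyGet?, PySem.List.pyIdx?]
  · rw [if_neg (by rw [hlen]; exact h1), if_neg (by simpa using h1), hlen]
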